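-- pv_equiv track=rewrite | github.com/salmakh1/DPFL | src/utils/train_utils.py | make_collaboration_symmetric
-- ===== SOURCE A (Python) =====
-- def make_collaboration_symmetric(clients_to_collaborate):
--     # Create a copy to modify the dictionary without affecting the iteration
--     updated_collaborations = clients_to_collaborate.copy()
--
--     for client_id, collaborators in clients_to_collaborate.items():
--         for collaborator in collaborators:
--             if collaborator not in updated_collaborations:
--                 # If the collaborator is not a key, initialize it with an empty list
--                 updated_collaborations[collaborator] = []
--             if client_id not in updated_collaborations[collaborator]:
--                 # Make the relationship symmetric
--                 updated_collaborations[collaborator].append(client_id)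
--
--     return updated_collaborations
-- ===== SOURCE B (Python) =====
-- def make_collaboration_symmetric(clients_to_collaborate):
--     # Closed-form rebuild: the symmetric value of every key is computable directly
--     # from the original lists, with no stateful updates.  (Return value only:
--     # unlike A, B does not mutate the caller's existing value lists in place.)
--     def references(c):
--         # clients that list c as a collaborator, in dict order
--         return [j for j, cs in clients_to_collaborate.items() if c in cs]
--
--     result = {k: v + [j for j in references(k) if j not in v]
--               for k, v in clients_to_collaborate.items()}
--     # new keys appear in order of first reference to a non-key collaborator
--     for _, cs in clients_to_collaborate.items():
--         for c in cs:
--             if c not in result: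
--                 result[c] = references(c)
--     return result
-- ===== Notes on version B (the rewrite author's own statement) =====
-- stated objective: alternative
-- what changed: A builds the result by stateful interleaved dict mutation (create-key/append per visited (client, collaborator) pair, reading lists it is itself growing); B computes each key's symmetric list in one closed-form comprehension over the original input (value = own list plus the clients referencing it that it does not already contain) and appends the fresh keys in first-reference order, with no incremental state. B does not reproduce A's in-place mutation of the caller's value lists; the equivalence is about the return value.
import Mathlib
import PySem

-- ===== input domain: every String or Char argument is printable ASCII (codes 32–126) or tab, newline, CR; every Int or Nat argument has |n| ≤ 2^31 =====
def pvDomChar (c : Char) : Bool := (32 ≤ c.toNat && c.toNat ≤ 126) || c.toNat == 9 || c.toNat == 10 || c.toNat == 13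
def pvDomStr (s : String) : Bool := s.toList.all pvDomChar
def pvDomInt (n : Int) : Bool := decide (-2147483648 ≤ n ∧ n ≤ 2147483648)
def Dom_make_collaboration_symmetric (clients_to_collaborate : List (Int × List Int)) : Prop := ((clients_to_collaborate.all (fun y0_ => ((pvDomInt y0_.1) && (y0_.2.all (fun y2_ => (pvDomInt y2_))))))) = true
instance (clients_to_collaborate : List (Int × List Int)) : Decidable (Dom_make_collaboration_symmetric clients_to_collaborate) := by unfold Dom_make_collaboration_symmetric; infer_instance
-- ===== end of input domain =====

-- B rebuilds each key's symmetric collaborator list in closed form from the original lists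
-- instead of A's stateful interleaved dict updates (objective: alternative; return value only —
-- A mutates the caller's existing value lists in place, B builds fresh lists).

-- ===== PORT A =====
-- one collaborator of the inner loop: ensure the key exists, then append client_id if absent
def pvPairStep (k : Int) (u : PySem.Dict Int (List Int)) (c : Int) : PySem.Dict Int (List Int) :=
  let u1 := if u.contains c then u else u.insert c []
  if k ∈ u1.getD c [] then u1 else u1.insert c (u1.getD c [] ++ [k])

-- one client of the outer loop.  Python iterates the LIVE list object updated[client_id];
-- that list cannot change while its own client is processed (appending client_id to it would
-- require client_id ∉ the list although it is the element being visited), so reading it once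
-- at loop entry is exact.
def pvClientStep (u : PySem.Dict Int (List Int)) (p : Int × List Int) : PySem.Dict Int (List Int) :=
  (u.getD p.1 []).foldl (pvPairStep p.1) u

def make_collaboration_symmetric (clients_to_collaborate : List (Int × List Int)) : List (Int × List Int) :=
  (clients_to_collaborate.foldl pvClientStep (PySem.Dict.mk clients_to_collaborate)).items

-- ===== PORT B =====
-- [j for j, cs in clients_to_collaborate.items() if c in cs]
def pvRefs (l : List (Int × List Int)) (c : Int) : List Int :=
  (l.filter (fun p => decide (c ∈ p.2))).map Prod.fst

def make_collaboration_symmetric_alt (clients_to_collaborate : List (Int × List Int)) : List (Int × List Int) :=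
  let base := clients_to_collaborate.map (fun p =>
    (p.1, p.2 ++ (pvRefs clients_to_collaborate p.1).filter (fun j => decide (j ∉ p.2))))
  clients_to_collaborate.foldl (fun res p => p.2.foldl (fun res c =>
    if c ∈ res.map Prod.fst then res else res ++ [(c, pvRefs clients_to_collaborate c)]) res) base

-- ===== PRECONDITION & SPEC =====
-- The association list encodes a Python dict, whose keys are necessarily distinct; no input
-- that can reach the Python function is excluded.
def Pre_make_collaboration_symmetric (clients_to_collaborate : List (Int × List Int)) : Prop :=
  (clients_to_collaborate.map Prod.fst).Nodup
instance (clients_to_collaborate : List (Int × List Int)) : Decidable (Pre_make_collaboration_symmetric clients_to_collaborate) := by unfold Pre_make_collaboration_symmetric; infer_instance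
def pvWitness_make_collaboration_symmetric : (List (Int × List Int)) := [(1, [2]), (2, [3])]

def Spec_make_collaboration_symmetric (clients_to_collaborate : List (Int × List Int)) (out : List (Int × List Int)) : Prop := out = make_collaboration_symmetric_alt clients_to_collaborate
instance (clients_to_collaborate : List (Int × List Int)) (out : List (Int × List Int)) : Decidable (Spec_make_collaboration_symmetric clients_to_collaborate out) := by unfold Spec_make_collaboration_symmetric; infer_instance

-- ===== CLAIM (what is proved, stated in full; the proofs are below) =====
def Claim_equal_make_collaboration_symmetric : Prop := ∀ (clients_to_collaborate : List (Int × List Int)), Dom_make_collaboration_symmetric clients_to_collaborate → Pre_make_collaboration_symmetric clients_to_collaborate → Spec_make_collaboration_symmetric clients_to_collaborate (make_collaboration_symmetric clients_to_collaborate)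

-- ===== LEMMAS AND PROOFS =====

-- fresh keys created so far: the non-keys among the referenced collaborators, first-reference order
def pvAddNew (K : List Int) (acc : List Int) (c : Int) : List Int :=
  if c ∈ K ∨ c ∈ acc then acc else acc ++ [c]
def pvNews (K : List Int) (P : List (Int × List Int)) (acc : List Int) : List Int :=
  P.foldl (fun acc q => q.2.foldl (pvAddNew K) acc) acc
-- the value of original key q after the clients of P have been processed
def pvVal (P : List (Int × List Int)) (q : Int × List Int) : Int × List Int :=
  (q.1, q.2 ++ (pvRefs P q.1).filter (fun j => decide (j ∉ q.2)))
-- A's dict state after processing the clients of the prefix P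
def pvS (l P : List (Int × List Int)) : PySem.Dict Int (List Int) :=
  PySem.Dict.mk (l.map (pvVal P) ++ (pvNews (l.map Prod.fst) P []).map (fun c => (c, pvRefs P c)))

theorem mem_pvRefs {j : Int} {P : List (Int × List Int)} {c : Int} :
    j ∈ pvRefs P c ↔ ∃ w, (j, w) ∈ P ∧ c ∈ w := by
  simp only [pvRefs, List.mem_map, List.mem_filter, decide_eq_true_eq]
  constructor
  · rintro ⟨⟨a, b⟩, ⟨hm, hc⟩, rfl⟩; exact ⟨b, hm, hc⟩
  · rintro ⟨w, hm, hc⟩; exact ⟨(j, w), ⟨hm, hc⟩, rfl⟩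

theorem mem_foldl_pvAddNew {x : Int} (K : List Int) (D : List Int) (acc : List Int) :
    x ∈ D.foldl (pvAddNew K) acc ↔ x ∈ acc ∨ (x ∈ D ∧ x ∉ K) := by
  induction D generalizing acc with
  | nil => simp
  | cons d D ih =>
    simp only [List.foldl_cons, ih, pvAddNew]
    split
    · rename_i h
      simp only [List.mem_cons]
      constructor <;> intro hc <;> rcases hc with hc | hc <;> try tauto
      rcases hc with ⟨hc1, hc2⟩
      rcases hc1 with rfl | hc1 <;> tauto
    · rename_i h
      rw [not_or] at h
      simp only [List.mem_append, List.mem_cons, List.not_mem_nil, or_false]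
      constructor <;> intro hc <;> rcases hc with hc | hc
      · rcases hc with hc | rfl <;> tauto
      · tauto
      · tauto
      · rcases hc with ⟨hc1, hc2⟩
        rcases hc1 with rfl | hc1 <;> tauto

theorem nodup_foldl_pvAddNew (K : List Int) (D : List Int) (acc : List Int)
    (h : acc.Nodup) : (D.foldl (pvAddNew K) acc).Nodup := by
  induction D generalizing acc with
  | nil => exact h
  | cons d D ih =>
    simp only [List.foldl_cons, pvAddNew]
    split
    · exact ih acc h
    · rename_i hnot
      rw [not_or] at hnot
      refine ih _ ?_
      rw [List.nodup_append]
      refine ⟨h, List.nodup_singleton d, ?_⟩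
      intro a ha b hb heq
      rcases List.mem_singleton.mp hb with rfl
      exact hnot.2 (heq ▸ ha)

theorem mem_pvNews {x : Int} (K : List Int) (P : List (Int × List Int)) (acc : List Int) :
    x ∈ pvNews K P acc ↔ x ∈ acc ∨ (x ∉ K ∧ ∃ q ∈ P, x ∈ q.2) := by
  induction P generalizing acc with
  | nil => simp [pvNews]
  | cons p P ih =>
    simp only [pvNews, List.foldl_cons] at *
    rw [ih, mem_foldl_pvAddNew]
    simp only [List.mem_cons]
    constructor
    · rintro ((h | ⟨hD, hK⟩) | ⟨hK, q, hq, hx⟩)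
      · exact Or.inl h
      · exact Or.inr ⟨hK, p, Or.inl rfl, hD⟩
      · exact Or.inr ⟨hK, q, Or.inr hq, hx⟩
    · rintro (h | ⟨hK, q, (rfl | hq), hx⟩)
      · exact Or.inl (Or.inl h)
      · exact Or.inl (Or.inr ⟨hx, hK⟩)
      · exact Or.inr ⟨hK, q, hq, hx⟩

theorem nodup_pvNews (K : List Int) (P : List (Int × List Int)) (acc : List Int)
    (h : acc.Nodup) : (pvNews K P acc).Nodup := by
  induction P generalizing acc with
  | nil => exact h
  | cons p P ih => exact ih _ (nodup_foldl_pvAddNew K p.2 acc h)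

theorem pvRefs_nil_of_not_news {c : Int} {K : List Int} {P : List (Int × List Int)}
    (hK : c ∉ K) (hN : c ∉ pvNews K P []) : pvRefs P c = [] := by
  by_contra h
  rcases List.exists_mem_of_ne_nil _ h with ⟨j, hj⟩
  rcases mem_pvRefs.mp hj with ⟨w, hm, hc⟩
  exact hN ((mem_pvNews K P []).mpr (Or.inr ⟨hK, (j, w), hm, hc⟩))

theorem foldl_noop {α β : Type} (f : α → β → α) (u : α) (es : List β)
    (h : ∀ x ∈ es, f u x = u) : es.foldl f u = u := by
  induction es with
  | nil => rfl
  | cons e es ih =>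
    rw [List.foldl_cons, h e (List.mem_cons_self), ih]
    intro x hx; exact h x (List.mem_cons_of_mem _ hx)

theorem pvRefs_append (P Q : List (Int × List Int)) (c : Int) :
    pvRefs (P ++ Q) c = pvRefs P c ++ pvRefs Q c := by
  simp [pvRefs]

theorem pvRefs_single (k : Int) (D : List Int) (c : Int) :
    pvRefs [(k, D)] c = if c ∈ D then [k] else [] := by
  by_cases h : c ∈ D <;> simp [pvRefs, h]

theorem keys_pvS (l P : List (Int × List Int)) :
    (pvS l P).keys = l.map Prod.fst ++ pvNews (l.map Prod.fst) P [] := by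
  simp [pvS, PySem.Dict.keys, pvVal, List.map_map, Function.comp_def]

theorem nodup_keys_pvS (l P : List (Int × List Int)) (hnd : (l.map Prod.fst).Nodup) :
    (pvS l P).keys.Nodup := by
  rw [keys_pvS, List.nodup_append]
  refine ⟨hnd, nodup_pvNews _ _ _ List.nodup_nil, ?_⟩
  intro a ha b hb heq
  rcases (mem_pvNews _ _ _).mp hb with h | ⟨hK, _⟩
  · simp at h
  · exact hK (heq ▸ ha)

theorem getD_pvS_key {l : List (Int × List Int)} (P : List (Int × List Int)) {c : Int} {w : List Int}
    (hnd : (l.map Prod.fst).Nodup) (h : (c, w) ∈ l) :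
    (pvS l P).getD c [] = w ++ (pvRefs P c).filter (fun j => decide (j ∉ w)) := by
  refine PySem.Dict.getD_of_mem_items _ ?_ (nodup_keys_pvS l P hnd) []
  show _ ∈ l.map (pvVal P) ++ _
  exact List.mem_append_left _ (List.mem_map.mpr ⟨(c, w), h, rfl⟩)

theorem getD_pvS_new {l : List (Int × List Int)} (P : List (Int × List Int)) {c : Int}
    (hnd : (l.map Prod.fst).Nodup) (h : c ∈ pvNews (l.map Prod.fst) P []) :
    (pvS l P).getD c [] = pvRefs P c := by
  refine PySem.Dict.getD_of_mem_items _ ?_ (nodup_keys_pvS l P hnd) []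
  show _ ∈ l.map (pvVal P) ++ _
  exact List.mem_append_right _ (List.mem_map.mpr ⟨c, h, rfl⟩)

theorem contains_pvS (l P : List (Int × List Int)) (c : Int) :
    (pvS l P).contains c
      = decide (c ∈ l.map Prod.fst ∨ c ∈ pvNews (l.map Prod.fst) P []) := by
  rw [PySem.Dict.contains_eq_decide_mem_keys, keys_pvS]
  simp only [List.mem_append]

theorem pvS_append_nil (l P : List (Int × List Int)) (k : Int) :
    pvS l (P ++ [(k, [])]) = pvS l P := by
  have hr : ∀ c, pvRefs (P ++ [(k, [])]) c = pvRefs P c := by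
    intro c; rw [pvRefs_append, pvRefs_single]; simp
  have hn : ∀ K acc, pvNews K (P ++ [(k, [])]) acc = pvNews K P acc := by
    intro K acc; simp [pvNews, List.foldl_append]
  simp only [pvS, hr, hn]
  congr 1
  congr 1
  apply List.map_congr_left
  intro q _
  simp [pvVal, hr]

theorem pvS_nil (l : List (Int × List Int)) : pvS l [] = PySem.Dict.mk l := by
  have h1 : ∀ q ∈ l, pvVal [] q = q := by
    intro q _; simp [pvVal, pvRefs]
  simp [pvS, pvNews, List.map_congr_left h1]

theorem key_unique {l : List (Int × List Int)} (hnd : (l.map Prod.fst).Nodup)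
    {x : Int} {w w' : List Int} (h1 : (x, w) ∈ l) (h2 : (x, w') ∈ l) : w = w' := by
  induction l with
  | nil => simp at h1
  | cons a l ih =>
    rw [List.map_cons, List.nodup_cons] at hnd
    rcases List.mem_cons.mp h1 with h1 | h1 <;> rcases List.mem_cons.mp h2 with h2 | h2
    · rw [← h1] at h2; injection h2 with _ h; exact h.symm
    · rw [← h1] at hnd
      exact absurd (List.mem_map.mpr ⟨(x, w'), h2, rfl⟩) hnd.1
    · rw [← h2] at hnd
      exact absurd (List.mem_map.mpr ⟨(x, w), h1, rfl⟩) hnd.1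
    · exact ih hnd.2 h1 h2

theorem pvStep {l P Q : List (Int × List Int)} {k : Int} {vk : List Int} (D : List Int) (c : Int)
    (hnd : (l.map Prod.fst).Nodup) (hl : l = P ++ (k, vk) :: Q) :
    pvPairStep k (pvS l (P ++ [(k, D)])) c = pvS l (P ++ [(k, D ++ [c])]) := by
  have hkP : k ∉ P.map Prod.fst := by
    have h := hnd; rw [hl, List.map_append, List.map_cons] at h
    rw [List.nodup_append] at h
    intro hk
    exact h.2.2 k hk k (List.mem_cons_self) rfl
  have hk_not_refs : ∀ x, k ∉ pvRefs P x := by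
    intro x hx
    rcases mem_pvRefs.mp hx with ⟨w, hm, _⟩
    exact hkP (List.mem_map.mpr ⟨(k, w), hm, rfl⟩)
  have hrefs : ∀ (E : List Int) x, pvRefs (P ++ [(k, E)]) x
      = pvRefs P x ++ (if x ∈ E then [k] else []) := by
    intro E x; rw [pvRefs_append, pvRefs_single]
  have hrefs_ne : ∀ x, x ≠ c → pvRefs (P ++ [(k, D)]) x = pvRefs (P ++ [(k, D ++ [c])]) x := by
    intro x hx
    rw [hrefs, hrefs]
    have hiff : (x ∈ D ++ [c]) ↔ (x ∈ D) := by simp [hx]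
    rw [if_congr hiff rfl rfl]
  have hrefs_cD : c ∈ D → pvRefs (P ++ [(k, D)]) c = pvRefs (P ++ [(k, D ++ [c])]) c := by
    intro h
    rw [hrefs, hrefs, if_pos h, if_pos (List.mem_append.mpr (Or.inl h))]
  have hN' : pvNews (l.map Prod.fst) (P ++ [(k, D)]) []
      = D.foldl (pvAddNew (l.map Prod.fst)) (pvNews (l.map Prod.fst) P []) := by
    simp [pvNews, List.foldl_append]
  have hN'' : pvNews (l.map Prod.fst) (P ++ [(k, D ++ [c])]) []
      = pvAddNew (l.map Prod.fst) (D.foldl (pvAddNew (l.map Prod.fst)) (pvNews (l.map Prod.fst) P []))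
        c := by
    simp [pvNews, List.foldl_append]
  set K := l.map Prod.fst with hK
  set NP := pvNews K P [] with hNP
  have hnotK_of_N' : ∀ x, x ∈ D.foldl (pvAddNew K) NP → x ∉ K := by
    intro x hx
    rcases (mem_foldl_pvAddNew K D NP).mp hx with hx | hx
    · rcases (mem_pvNews K P []).mp hx with h | h
      · simp at h
      · exact h.1
    · exact hx.2
  by_cases hcK : c ∈ K
  · -- c is an original key, with value w
    obtain ⟨q0, hq0, hq0f⟩ := List.mem_map.mp hcK
    obtain ⟨w, hmem⟩ : ∃ w, (c, w) ∈ l := ⟨q0.2, by rw [← hq0f]; exact hq0⟩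
    have hcont : (pvS l (P ++ [(k, D)])).contains c = true := by
      rw [contains_pvS]; exact decide_eq_true (Or.inl hcK)
    have hg := getD_pvS_key (P ++ [(k, D)]) hnd hmem
    have hkg : k ∈ (pvS l (P ++ [(k, D)])).getD c [] ↔ (k ∈ w ∨ c ∈ D) := by
      rw [hg, hrefs]
      by_cases hcD : c ∈ D <;> by_cases hkw : k ∈ w <;>
        simp [hcD, hkw, List.mem_filter, hk_not_refs c]
    by_cases hkgm : k ∈ (pvS l (P ++ [(k, D)])).getD c []
    · -- no-op step
      have hred : pvPairStep k (pvS l (P ++ [(k, D)])) c = pvS l (P ++ [(k, D)]) := by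
        simp [pvPairStep, hcont, hkgm]
      rw [hred]
      have hor := hkg.mp hkgm
      apply PySem.Dict.ext
      show List.map _ l ++ _ = List.map _ l ++ _
      rw [hN', hN'', pvAddNew, if_pos (Or.inl hcK)]
      congr 1
      · apply List.map_congr_left
        intro q hql
        by_cases hq : q.1 = c
        · have hql' : (c, q.2) ∈ l := by rw [← hq]; exact hql
          have hw : q.2 = w := key_unique hnd hql' hmem
          simp only [pvVal, hrefs, hq, hw]
          rcases hor with hkw | hcD
          · by_cases hcD : c ∈ D <;> simp [hcD, hkw]
          · simp [hcD, List.mem_append.mpr (Or.inl hcD)]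
        · simp only [pvVal, hrefs_ne q.1 hq]
      · apply List.map_congr_left
        intro x hx
        have hxc : x ≠ c := fun h => (hnotK_of_N' x hx) (h ▸ hcK)
        rw [hrefs_ne x hxc]
    · -- append step at an existing key
      have hkw : k ∉ w := fun h => hkgm (hkg.mpr (Or.inl h))
      have hcD : c ∉ D := fun h => hkgm (hkg.mpr (Or.inr h))
      have hred : pvPairStep k (pvS l (P ++ [(k, D)])) c
          = (pvS l (P ++ [(k, D)])).insert c ((pvS l (P ++ [(k, D)])).getD c [] ++ [k]) := by
        simp [pvPairStep, hcont, hkgm]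
      rw [hred, PySem.Dict.ext_iff, PySem.Dict.items_insert_of_contains _ _ hcont]
      show List.map _ (List.map _ l ++ _) = List.map _ l ++ _
      rw [List.map_append, List.map_map, List.map_map, hN', hN'', pvAddNew, if_pos (Or.inl hcK)]
      congr 1
      · apply List.map_congr_left
        intro q hql
        by_cases hq : q.1 = c
        · have hql' : (c, q.2) ∈ l := by rw [← hq]; exact hql
          have hw : q.2 = w := key_unique hnd hql' hmem
          simp only [Function.comp_apply, pvVal, hg, hrefs, hq, hw, beq_self_eq_true, if_pos,
            List.filter_append]
          simp [hcD, hkw]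
        · simp only [Function.comp_apply, pvVal]
          rw [if_neg (by simp [hq]), hrefs_ne q.1 hq]
      · apply List.map_congr_left
        intro x hx
        have hxc : x ≠ c := fun h => (hnotK_of_N' x hx) (h ▸ hcK)
        simp only [Function.comp_apply]
        rw [if_neg (by simp [hxc]), hrefs_ne x hxc]
  · by_cases hcN : c ∈ D.foldl (pvAddNew K) NP
    · -- c is an already-created fresh key
      have hcont : (pvS l (P ++ [(k, D)])).contains c = true := by
        rw [contains_pvS]; exact decide_eq_true (Or.inr (hN' ▸ hcN))
      have hg : (pvS l (P ++ [(k, D)])).getD c [] = pvRefs (P ++ [(k, D)]) c :=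
        getD_pvS_new _ hnd (hN' ▸ hcN)
      have hkey_ne : ∀ q, q ∈ l → q.1 ≠ c := by
        intro q hql h
        exact hcK (h ▸ List.mem_map.mpr ⟨q, hql, rfl⟩)
      have hkg : k ∈ (pvS l (P ++ [(k, D)])).getD c [] ↔ c ∈ D := by
        rw [hg, hrefs]
        by_cases hcD : c ∈ D <;> simp [hcD, hk_not_refs c]
      by_cases hkgm : k ∈ (pvS l (P ++ [(k, D)])).getD c []
      · -- no-op step
        have hcD := hkg.mp hkgm
        have hred : pvPairStep k (pvS l (P ++ [(k, D)])) c = pvS l (P ++ [(k, D)]) := by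
          simp [pvPairStep, hcont, hkgm]
        rw [hred]
        apply PySem.Dict.ext
        show List.map _ l ++ _ = List.map _ l ++ _
        rw [hN', hN'', pvAddNew, if_pos (Or.inr hcN)]
        congr 1
        · apply List.map_congr_left
          intro q hql
          simp only [pvVal, hrefs_ne q.1 (hkey_ne q hql)]
        · apply List.map_congr_left
          intro x hx
          by_cases hxc : x = c
          · rw [hxc, hrefs_cD hcD]
          · rw [hrefs_ne x hxc]
      · -- append step at a fresh key
        have hcD : c ∉ D := fun h => hkgm (hkg.mpr h)
        have hred : pvPairStep k (pvS l (P ++ [(k, D)])) c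
            = (pvS l (P ++ [(k, D)])).insert c ((pvS l (P ++ [(k, D)])).getD c [] ++ [k]) := by
          simp [pvPairStep, hcont, hkgm]
        rw [hred, PySem.Dict.ext_iff, PySem.Dict.items_insert_of_contains _ _ hcont]
        show List.map _ (List.map _ l ++ _) = List.map _ l ++ _
        rw [List.map_append, List.map_map, List.map_map, hN', hN'', pvAddNew,
          if_pos (Or.inr hcN)]
        congr 1
        · apply List.map_congr_left
          intro q hql
          simp only [Function.comp_apply, pvVal]
          rw [if_neg (by simp [hkey_ne q hql]), hrefs_ne q.1 (hkey_ne q hql)]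
        · apply List.map_congr_left
          intro x hx
          by_cases hxc : x = c
          · subst hxc
            simp only [Function.comp_apply, beq_self_eq_true, if_pos]
            rw [hg, hrefs, hrefs, if_neg hcD, if_pos (List.mem_append.mpr (Or.inr List.mem_cons_self))]
            simp
          · simp only [Function.comp_apply]
            rw [if_neg (by simp [hxc]), hrefs_ne x hxc]
    · -- c is brand new: create it, then append
      have hcNP : c ∉ NP := fun h => hcN ((mem_foldl_pvAddNew K D NP).mpr (Or.inl h))
      have hrefsP : pvRefs P c = [] := pvRefs_nil_of_not_news hcK hcNP
      have hcont : (pvS l (P ++ [(k, D)])).contains c = false := by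
        rw [contains_pvS]
        simp only [decide_eq_false_iff_not, not_or]
        exact ⟨hcK, fun h => hcN (hN' ▸ h)⟩
      have hkey_ne : ∀ q, q ∈ l → q.1 ≠ c := by
        intro q hql h
        exact hcK (h ▸ List.mem_map.mpr ⟨q, hql, rfl⟩)
      have hcDfold : c ∉ D := by
        intro h
        exact hcN ((mem_foldl_pvAddNew K D NP).mpr (Or.inr ⟨h, hcK⟩))
      have hred : pvPairStep k (pvS l (P ++ [(k, D)])) c
          = (pvS l (P ++ [(k, D)])).insert c [k] := by
        simp only [pvPairStep, hcont, Bool.false_eq_true, if_false]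
        rw [PySem.Dict.getD_insert_self]
        simp only [List.not_mem_nil, if_false, List.nil_append]
        rw [PySem.Dict.insert_insert_self]
      rw [hred, PySem.Dict.ext_iff, PySem.Dict.items_insert_of_not_contains _ _ hcont]
      show (List.map _ l ++ _) ++ _ = List.map _ l ++ _
      rw [hN', hN'', pvAddNew, if_neg (by exact fun h => h.elim hcK hcN), List.map_append,
        List.append_assoc]
      congr 1
      · apply List.map_congr_left
        intro q hql
        simp only [pvVal, hrefs_ne q.1 (hkey_ne q hql)]
      congr 1
      · apply List.map_congr_left
        intro x hx
        rw [hrefs_ne x (fun h => hcN (h ▸ hx))]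
      · simp only [List.map_cons, List.map_nil]
        rw [hrefs, hrefsP, if_pos (List.mem_append.mpr (Or.inr List.mem_cons_self))]
        simp

theorem pvInner {l P Q : List (Int × List Int)} {k : Int} {vk : List Int}
    (hnd : (l.map Prod.fst).Nodup) (hl : l = P ++ (k, vk) :: Q) :
    ∀ (E D : List Int), vk = D ++ E →
      E.foldl (pvPairStep k) (pvS l (P ++ [(k, D)])) = pvS l (P ++ [(k, vk)]) := by
  intro E
  induction E with
  | nil =>
    intro D h
    rw [List.append_nil] at h
    rw [List.foldl_nil, h]
  | cons e E ih =>
    intro D h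
    rw [List.foldl_cons, pvStep D e hnd hl]
    exact ih (D ++ [e]) (by rw [h, List.append_assoc]; rfl)

theorem pvOuter {l : List (Int × List Int)} (hnd : (l.map Prod.fst).Nodup) :
    ∀ (Q P : List (Int × List Int)), l = P ++ Q →
      Q.foldl pvClientStep (pvS l P) = pvS l l := by
  intro Q
  induction Q with
  | nil =>
    intro P h
    rw [List.foldl_nil, h, List.append_nil]
  | cons p Q ih =>
    intro P hl
    obtain ⟨k, vk⟩ := p
    have hmem : (k, vk) ∈ l := by
      rw [hl]; exact List.mem_append_right _ (List.mem_cons_self)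
    have hstep : pvClientStep (pvS l P) (k, vk) = pvS l (P ++ [(k, vk)]) := by
      show ((pvS l P).getD k []).foldl (pvPairStep k) (pvS l P) = _
      rw [getD_pvS_key P hnd hmem, List.foldl_append]
      rw [← pvS_append_nil l P k, pvInner hnd hl vk [] rfl]
      apply foldl_noop
      intro j hj
      rcases mem_pvRefs.mp (List.mem_filter.mp hj).1 with ⟨w, hjP, hkw⟩
      have hjl : (j, w) ∈ l := by rw [hl]; exact List.mem_append_left _ hjP
      have hcont : (pvS l (P ++ [(k, vk)])).contains j = true := by
        rw [contains_pvS]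
        exact decide_eq_true (Or.inl (List.mem_map.mpr ⟨(j, w), hjl, rfl⟩))
      have hkmem : k ∈ (pvS l (P ++ [(k, vk)])).getD j [] := by
        rw [getD_pvS_key _ hnd hjl]
        exact List.mem_append_left _ hkw
      simp [pvPairStep, hcont, hkmem]
    rw [List.foldl_cons, hstep]
    exact ih (P ++ [(k, vk)]) (by rw [hl, List.append_assoc]; rfl)

theorem pvAlt_fold_inner (l : List (Int × List Int)) :
    ∀ (cs acc : List Int),
      cs.foldl (fun res c => if c ∈ res.map Prod.fst then res else res ++ [(c, pvRefs l c)])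
          (l.map (pvVal l) ++ acc.map (fun c => (c, pvRefs l c)))
        = l.map (pvVal l)
          ++ (cs.foldl (pvAddNew (l.map Prod.fst)) acc).map (fun c => (c, pvRefs l c)) := by
  intro cs
  induction cs with
  | nil => intro acc; rfl
  | cons c cs ih =>
    intro acc
    rw [List.foldl_cons, List.foldl_cons]
    have hmem : (c ∈ (l.map (pvVal l) ++ acc.map (fun c => (c, pvRefs l c))).map Prod.fst)
        ↔ (c ∈ l.map Prod.fst ∨ c ∈ acc) := by
      simp [List.map_map, Function.comp_def, pvVal]
    by_cases h : c ∈ l.map Prod.fst ∨ c ∈ acc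
    · rw [if_pos (hmem.mpr h), pvAddNew, if_pos h]
      exact ih acc
    · rw [if_neg (fun hc => h (hmem.mp hc)), pvAddNew, if_neg h, List.append_assoc]
      have : (acc.map (fun c => (c, pvRefs l c)) ++ [(c, pvRefs l c)])
          = (acc ++ [c]).map (fun c => (c, pvRefs l c)) := by simp
      rw [this]
      exact ih (acc ++ [c])

theorem pvAlt_fold (l : List (Int × List Int)) :
    ∀ (P : List (Int × List Int)) (acc : List Int),
      P.foldl (fun res p => p.2.foldl
          (fun res c => if c ∈ res.map Prod.fst then res else res ++ [(c, pvRefs l c)]) res)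
          (l.map (pvVal l) ++ acc.map (fun c => (c, pvRefs l c)))
        = l.map (pvVal l)
          ++ (pvNews (l.map Prod.fst) P acc).map (fun c => (c, pvRefs l c)) := by
  intro P
  induction P with
  | nil => intro acc; rfl
  | cons p P ih =>
    intro acc
    rw [List.foldl_cons, pvAlt_fold_inner l p.2 acc]
    exact ih _
theorem pvAlt_eq (l : List (Int × List Int)) :
    make_collaboration_symmetric_alt l = (pvS l l).items := by
  have h := pvAlt_fold l l []
  simp only [List.map_nil, List.append_nil] at h
  exact h

-- ===== VERDICT (by name: the statement is the Claim_ definition above) =====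
theorem make_collaboration_symmetric_spec : Claim_equal_make_collaboration_symmetric := by
  intro l _ hpre
  unfold Spec_make_collaboration_symmetric
  rw [make_collaboration_symmetric, pvAlt_eq, ← pvS_nil l,
    pvOuter hpre l [] (List.nil_append l).symm]
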